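-- pv_equiv track=rewrite | github.com/hgascon/pulsar | pulsar/core/util.py | scanTokens
-- ===== SOURCE A (Python) =====
-- WS = 0
--
-- TOK = 1
--
-- def scanTokens(msg, whitespace):
--     curVal = ""
--     curType = None
--     scan = []
--     for m in msg:
--         if m in whitespace:
--             # we have whitespace
--             if curType is None:
--                 curType = WS
--                 curVal = m
--             elif curType is TOK:
--                 scan.append( (TOK, curVal) )
--                 curType = WS
--                 curVal = m
--             else:
--                 curVal += m
--         else:
--             # we have a token
--             if curType is None:
--                 curType = TOK
--                 curVal = m
--             elif curType is WS:
--                 scan.append( (WS, curVal) )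
--                 curType = TOK
--                 curVal = m
--             else:
--                 curVal += m
--
--     if curType is not None:
--         if curType is TOK:
--             scan.append( (TOK, curVal) )
--         else:
--             scan.append( (WS, curVal) )
--     return scan
-- ===== SOURCE B (Python) =====
-- WS = 0
--
-- TOK = 1
--
-- def scanTokens(msg, whitespace):
--     # Run scanner: find each maximal run of same-class chars by index, emit a slice.
--     scan = []
--     i = 0
--     n = len(msg)
--     while i < n:
--         is_ws = msg[i] in whitespace
--         j = i + 1
--         while j < n and (msg[j] in whitespace) == is_ws:
--             j += 1
--         scan.append((WS if is_ws else TOK, msg[i:j]))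
--         i = j
--     return scan
-- ===== Notes on version B (the rewrite author's own statement) =====
-- stated objective: simpler
-- what changed: Replaced A's per-character curType/curVal state machine (with a trailing flush) by an index-based run scanner that finds the end of each maximal same-class run and emits it as one slice.
import Mathlib
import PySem

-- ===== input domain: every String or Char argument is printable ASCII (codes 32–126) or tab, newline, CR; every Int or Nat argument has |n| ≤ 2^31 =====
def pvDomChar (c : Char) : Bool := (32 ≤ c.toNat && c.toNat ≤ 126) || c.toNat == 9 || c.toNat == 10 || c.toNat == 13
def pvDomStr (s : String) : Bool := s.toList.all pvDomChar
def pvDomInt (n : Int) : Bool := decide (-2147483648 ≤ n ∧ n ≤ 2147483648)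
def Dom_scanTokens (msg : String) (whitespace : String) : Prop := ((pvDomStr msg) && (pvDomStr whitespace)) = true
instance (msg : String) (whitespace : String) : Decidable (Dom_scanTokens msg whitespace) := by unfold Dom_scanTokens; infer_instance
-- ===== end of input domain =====

-- B replaces A's per-character curType/curVal state machine by an index-based scanner that
-- emits each maximal same-class run as one slice (objective: simpler decomposition; same cost).

-- ===== PORT A =====
-- state: (curVal, curType, scan); 'm in whitespace' for a single char is char membership
def pvStepA (ws : List Char) (st : List Char × Option Int × List (Int × String)) (m : Char) :
    List Char × Option Int × List (Int × String) :=
  match st with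
  | (curVal, curType, scan) =>
    if ws.contains m then
      match curType with
      | none => ([m], some 0, scan)
      | some t =>
        if t = 1 then ([m], some 0, scan ++ [(1, String.ofList curVal)])
        else (curVal ++ [m], some t, scan)
    else
      match curType with
      | none => ([m], some 1, scan)
      | some t =>
        if t = 0 then ([m], some 1, scan ++ [(0, String.ofList curVal)])
        else (curVal ++ [m], some t, scan)

-- the trailing 'if curType is not None' flush of A
def pvFlushA (st : List Char × Option Int × List (Int × String)) : List (Int × String) :=
  match st with
  | (_, none, scan) => scan
  | (curVal, some t, scan) =>
    if t = 1 then scan ++ [(1, String.ofList curVal)] else scan ++ [(0, String.ofList curVal)]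

def scanTokens (msg : String) (whitespace : String) : List (Int × String) :=
  pvFlushA (msg.toList.foldl (pvStepA whitespace.toList) ([], none, []))

-- ===== PORT B =====
-- Source B's outer while emits one maximal run per iteration: the run is the head char plus the
-- chars while (msg[j] in whitespace) == is_ws (takeWhile), the slice msg[i:j]; the scan
-- resumes at j (dropWhile). Ported as the structural run-splitting recursion.
def pvRuns (key : Char → Bool) : List Char → List (Bool × List Char)
  | [] => []
  | c :: cs =>
    (key c, c :: cs.takeWhile (fun d => key d == key c)) ::
      pvRuns key (cs.dropWhile (fun d => key d == key c))
termination_by l => l.length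
decreasing_by
  exact Nat.lt_succ_of_le (cs.length_dropWhile_le _)

def scanTokens_alt (msg : String) (whitespace : String) : List (Int × String) :=
  (pvRuns (fun c => whitespace.toList.contains c) msg.toList).map
    (fun r => (if r.1 then (0 : Int) else 1, String.ofList r.2))

-- ===== PRECONDITION & SPEC =====
def Spec_scanTokens (msg : String) (whitespace : String) (out : List (Int × String)) : Prop := out = scanTokens_alt msg whitespace
instance (msg : String) (whitespace : String) (out : List (Int × String)) : Decidable (Spec_scanTokens msg whitespace out) := by unfold Spec_scanTokens; infer_instance

-- ===== CLAIM (what is proved, stated in full; the proofs are below) =====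
def Claim_equal_scanTokens : Prop := ∀ (msg : String) (whitespace : String), Dom_scanTokens msg whitespace → Spec_scanTokens msg whitespace (scanTokens msg whitespace)

-- ===== LEMMAS AND PROOFS =====

def pvConv (r : Bool × List Char) : Int × String := (if r.1 then (0 : Int) else 1, String.ofList r.2)

-- prepend a partial run v of class k onto a run list, merging with the first run if same class
def pvGlue (k : Bool) (v : List Char) : List (Bool × List Char) → List (Bool × List Char)
  | [] => [(k, v)]
  | (k', g) :: rs => if k' = k then (k, v ++ g) :: rs else (k, v) :: (k', g) :: rs

lemma pvGlue_glue (k : Bool) (v w : List Char) (rs : List (Bool × List Char)) :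
    pvGlue k v (pvGlue k w rs) = pvGlue k (v ++ w) rs := by
  cases rs with
  | nil => simp [pvGlue]
  | cons r rs =>
    obtain ⟨k', g⟩ := r
    by_cases h : k' = k <;> simp [pvGlue, h]

lemma pvRuns_cons (key : Char → Bool) (c : Char) (cs : List Char) :
    pvRuns key (c :: cs) = pvGlue (key c) [c] (pvRuns key cs) := by
  cases cs with
  | nil => simp [pvRuns, pvGlue]
  | cons d ds =>
    rw [pvRuns, pvRuns]
    by_cases h : key d = key c
    · simp only [← h, List.takeWhile, List.dropWhile, beq_self_eq_true, pvGlue,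
        List.cons_append, List.nil_append]
      simp
    · have hb : (key d == key c) = false := by simp [h]
      simp [List.takeWhile, List.dropWhile, hb, pvGlue, h, pvRuns]

lemma pvStepA_typed (ws : List Char) (k : Bool) (v : List Char) (scan : List (Int × String)) (c : Char) :
    pvStepA ws (v, some (if k then 0 else 1), scan) c =
      if ws.contains c = k then (v ++ [c], some (if k then 0 else 1), scan)
      else ([c], some (if ws.contains c then 0 else 1), scan ++ [pvConv (k, v)]) := by
  cases k <;> by_cases h : c ∈ ws <;> simp [pvStepA, pvConv, h]

lemma pvMain (ws : List Char) (l : List Char) :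
    ∀ (k : Bool) (v : List Char) (scan : List (Int × String)),
      pvFlushA (l.foldl (pvStepA ws) (v, some (if k then 0 else 1), scan)) =
        scan ++ (pvGlue k v (pvRuns (fun c => ws.contains c) l)).map pvConv := by
  induction l with
  | nil =>
    intro k v scan
    cases k <;> simp [pvFlushA, pvRuns, pvGlue, pvConv]
  | cons c cs ih =>
    intro k v scan
    rw [List.foldl_cons, pvStepA_typed, pvRuns_cons]
    generalize hkc : ws.contains c = kc
    by_cases h : kc = k
    · rw [if_pos h, ih, h, pvGlue_glue]
    · rw [if_neg h, ih]
      have hne : ¬ kc = k := h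
      have hglue : pvGlue k v (pvGlue kc [c] (pvRuns (fun c => ws.contains c) cs))
          = (k, v) :: pvGlue kc [c] (pvRuns (fun c => ws.contains c) cs) := by
        cases hr : pvRuns (fun c => ws.contains c) cs with
        | nil => simp [pvGlue, hne]
        | cons r rs =>
          obtain ⟨k', g⟩ := r
          by_cases hk : k' = kc <;> simp [pvGlue, hk, hne]
      rw [hglue]
      simp [pvConv]

-- ===== VERDICT (by name: the statement is the Claim_ definition above) =====
theorem scanTokens_spec : Claim_equal_scanTokens := by
  intro msg whitespace _
  unfold Spec_scanTokens scanTokens scanTokens_alt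
  cases hm : msg.toList with
  | nil => simp [pvFlushA, pvRuns]
  | cons c cs =>
    have h0 : pvStepA whitespace.toList ([], none, []) c =
        ([c], some (if whitespace.toList.contains c then 0 else 1), []) := by
      by_cases h : c ∈ whitespace.toList <;> simp [pvStepA, h]
    rw [List.foldl_cons, h0, pvMain, pvRuns_cons, List.nil_append]
    rfl
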